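-- pv_equiv track=rewrite | github.com/danielslloyd/Simplify | text_tools/boilerplate.py | _detect_gutenberg
-- ===== SOURCE A (Python) =====
-- GUTENBERG_START_MARKERS = [
--     "*** START OF THE PROJECT GUTENBERG",
--     "*** START OF THIS PROJECT GUTENBERG",
-- ]
--
-- GUTENBERG_END_MARKERS = [
--     "*** END OF THE PROJECT GUTENBERG",
--     "*** END OF THIS PROJECT GUTENBERG",
-- ]
--
-- def _detect_gutenberg(lines: list[str]) -> dict:
--     """Return header/footer line ranges if Gutenberg markers found."""
--     header_end = None
--     footer_start = None
--
--     for i, line in enumerate(lines):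
--         for marker in GUTENBERG_START_MARKERS:
--             if marker.lower() in line.lower():
--                 header_end = i
--                 break
--
--     for i in range(len(lines) - 1, -1, -1):
--         for marker in GUTENBERG_END_MARKERS:
--             if marker.lower() in lines[i].lower():
--                 footer_start = i
--                 break
--         if footer_start is not None:
--             break
--
--     result = {"header": None, "footer": None}
--     if header_end is not None:
--         result["header"] = (0, header_end)
--     if footer_start is not None:
--         result["footer"] = (footer_start, len(lines) - 1)
--     return result
-- ===== SOURCE B (Python) =====
-- GUTENBERG_START_MARKERS = [
--     "*** START OF THE PROJECT GUTENBERG",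
--     "*** START OF THIS PROJECT GUTENBERG",
-- ]
--
-- GUTENBERG_END_MARKERS = [
--     "*** END OF THE PROJECT GUTENBERG",
--     "*** END OF THIS PROJECT GUTENBERG",
-- ]
--
-- def _detect_gutenberg(lines: list[str]) -> dict:
--     """Single forward pass: overwrite header_end / footer_start on every marker hit."""
--     starts = [m.lower() for m in GUTENBERG_START_MARKERS]
--     ends = [m.lower() for m in GUTENBERG_END_MARKERS]
--     header_end = None
--     footer_start = None
--     for i, line in enumerate(lines):
--         low = line.lower()
--         if any(m in low for m in starts):
--             header_end = i
--         if any(m in low for m in ends):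
--             footer_start = i
--     result = {"header": None, "footer": None}
--     if header_end is not None:
--         result["header"] = (0, header_end)
--     if footer_start is not None:
--         result["footer"] = (footer_start, len(lines) - 1)
--     return result
-- ===== Notes on version B (the rewrite author's own statement) =====
-- stated objective: simpler
-- what changed: Replaces A's two separate traversals (a forward overwrite pass for the header and a reversed early-exit scan for the footer) with one forward enumerate pass that maintains both header_end and footer_start by overwriting on each marker hit.
import Mathlib
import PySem

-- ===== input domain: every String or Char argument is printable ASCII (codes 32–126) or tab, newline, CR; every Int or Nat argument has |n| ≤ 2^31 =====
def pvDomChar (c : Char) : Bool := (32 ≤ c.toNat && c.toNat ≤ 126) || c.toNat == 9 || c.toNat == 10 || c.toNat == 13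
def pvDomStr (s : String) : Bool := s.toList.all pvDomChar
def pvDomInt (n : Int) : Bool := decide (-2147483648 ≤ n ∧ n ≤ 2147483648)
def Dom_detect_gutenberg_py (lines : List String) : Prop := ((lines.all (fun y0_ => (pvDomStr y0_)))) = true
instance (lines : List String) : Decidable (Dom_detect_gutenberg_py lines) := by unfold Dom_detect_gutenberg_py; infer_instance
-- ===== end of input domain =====

-- B replaces A's two passes (forward overwrite for the header, reversed early-exit scan
-- for the footer) by ONE forward pass maintaining both; objective: simpler.

-- ===== PORT A =====
def GUTENBERG_START_MARKERS : List String :=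
  ["*** START OF THE PROJECT GUTENBERG", "*** START OF THIS PROJECT GUTENBERG"]

def GUTENBERG_END_MARKERS : List String :=
  ["*** END OF THE PROJECT GUTENBERG", "*** END OF THIS PROJECT GUTENBERG"]

-- inner 'for marker in markers: if marker.lower() in line.lower(): var = i; break'
def pvMarkerLoop (markers : List String) (line : String) (i : Int) (cur : Option Int) : Option Int :=
  match markers with
  | [] => cur
  | m :: rest =>
    if PySem.Str.isIn (PySem.Str.lower m) (PySem.Str.lower line) then some i
    else pvMarkerLoop rest line i cur

-- the reversed footer loop with its early 'break' once footer_start is set;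
-- lines[i] ported with pyGetD (every index produced by the range is in bounds, so exact)
def pvFooterLoop (lines : List String) : List Int → Option Int
  | [] => none
  | i :: rest =>
    match pvMarkerLoop GUTENBERG_END_MARKERS (PySem.List.pyGetD lines i "") i none with
    | some j => some j
    | none => pvFooterLoop lines rest

def detect_gutenberg_py (lines : List String) : List (String × Option (Int × Int)) :=
  let header_end : Option Int :=
    (PySem.List.enumerate lines 0).foldl
      (fun acc p => pvMarkerLoop GUTENBERG_START_MARKERS p.2 p.1 acc) none
  let footer_start : Option Int :=
    pvFooterLoop lines (PySem.List.pyRange ((lines.length : Int) - 1) (-1) (-1))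
  [("header", header_end.map (fun h => ((0 : Int), h))),
   ("footer", footer_start.map (fun f => (f, (lines.length : Int) - 1)))]

-- ===== PORT B =====
def pvHasMarker (markers : List String) (line : String) : Bool :=
  (markers.map PySem.Str.lower).any (fun m => PySem.Str.isIn m (PySem.Str.lower line))

def detect_gutenberg_py_alt (lines : List String) : List (String × Option (Int × Int)) :=
  let st : Option Int × Option Int :=
    (PySem.List.enumerate lines 0).foldl
      (fun acc p =>
        (if pvHasMarker GUTENBERG_START_MARKERS p.2 then some p.1 else acc.1,
         if pvHasMarker GUTENBERG_END_MARKERS p.2 then some p.1 else acc.2))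
      (none, none)
  [("header", st.1.map (fun h => ((0 : Int), h))),
   ("footer", st.2.map (fun f => (f, (lines.length : Int) - 1)))]

-- ===== PRECONDITION & SPEC =====
def Spec_detect_gutenberg_py (lines : List String) (out : List (String × Option (Int × Int))) : Prop := out = detect_gutenberg_py_alt lines
instance (lines : List String) (out : List (String × Option (Int × Int))) : Decidable (Spec_detect_gutenberg_py lines out) := by unfold Spec_detect_gutenberg_py; infer_instance

-- ===== CLAIM (what is proved, stated in full; the proofs are below) =====
def Claim_equal_detect_gutenberg_py : Prop := ∀ (lines : List String), Dom_detect_gutenberg_py lines → Spec_detect_gutenberg_py lines (detect_gutenberg_py lines)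

-- ===== LEMMAS AND PROOFS =====

-- the marker loop is 'if any marker matches then some i else cur'
theorem pvMarkerLoop_eq (markers : List String) (line : String) (i : Int) (cur : Option Int) :
    pvMarkerLoop markers line i cur =
      if pvHasMarker markers line then some i else cur := by
  induction markers with
  | nil => simp [pvMarkerLoop, pvHasMarker]
  | cons m rest ih =>
    show (if PySem.Str.isIn (PySem.Str.lower m) (PySem.Str.lower line) then some i
          else pvMarkerLoop rest line i cur) = _
    rw [ih]
    simp only [pvHasMarker, List.map_cons, List.any_cons, Bool.or_eq_true]
    split_ifs with h1 h2 <;> first | rfl | tauto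

-- first-match scan over a list of indices
def pvFirst (q : Int → Bool) : List Int → Option Int
  | [] => none
  | i :: rest => if q i then some i else pvFirst q rest

theorem pvFooterLoop_eq_first (lines : List String) (l : List Int) :
    pvFooterLoop lines l =
      pvFirst (fun i => pvHasMarker GUTENBERG_END_MARKERS (PySem.List.pyGetD lines i "")) l := by
  induction l with
  | nil => rfl
  | cons i rest ih =>
    simp only [pvFooterLoop, pvFirst, pvMarkerLoop_eq]
    by_cases h : pvHasMarker GUTENBERG_END_MARKERS (PySem.List.pyGetD lines i "") = true <;>
      simp [h, ih]

theorem pvFirst_append (q : Int → Bool) (xs ys : List Int) :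
    pvFirst q (xs ++ ys) =
      match pvFirst q xs with
      | some j => some j
      | none => pvFirst q ys := by
  induction xs with
  | nil => rfl
  | cons i rest ih =>
    by_cases h : q i = true <;> simp [pvFirst, h, ih]

-- last-match forward fold = first match of the reversed list (seed as fallback)
theorem pvFoldl_eq_first_reverse (q : Int → Bool) (l : List Int) (a : Option Int) :
    l.foldl (fun acc i => if q i then some i else acc) a =
      match pvFirst q l.reverse with
      | some j => some j
      | none => a := by
  induction l generalizing a with
  | nil => rfl
  | cons i rest ih =>
    simp only [List.foldl_cons, List.reverse_cons, pvFirst_append, ih]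
    by_cases h : q i = true <;>
      cases hf : pvFirst q rest.reverse <;> simp [pvFirst, h]

-- a pairwise-independent fold splits into two folds
theorem pvFoldl_pair {α : Type} (f g : Option Int → α → Option Int)
    (l : List α) (a b : Option Int) :
    l.foldl (fun (acc : Option Int × Option Int) x => (f acc.1 x, g acc.2 x)) (a, b) =
      (l.foldl f a, l.foldl g b) := by
  induction l generalizing a b with
  | nil => rfl
  | cons x rest ih => simp [List.foldl_cons, ih]

-- A's header fold rewritten with pvMarkerLoop_eq
theorem pvHeaderFold (l : List (Int × String)) (a : Option Int) :
    l.foldl (fun acc p => pvMarkerLoop GUTENBERG_START_MARKERS p.2 p.1 acc) a =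
      l.foldl (fun acc p => if pvHasMarker GUTENBERG_START_MARKERS p.2 then some p.1 else acc) a := by
  induction l generalizing a with
  | nil => rfl
  | cons p rest _ => simp only [List.foldl_cons, pvMarkerLoop_eq]

-- A's reversed early-exit footer scan = B's forward overwrite fold
theorem pvFooterEq (lines : List String) :
    pvFooterLoop lines (PySem.List.pyRange ((lines.length : Int) - 1) (-1) (-1)) =
      (PySem.List.enumerate lines 0).foldl
        (fun acc p => if pvHasMarker GUTENBERG_END_MARKERS p.2 then some p.1 else acc) none := by
  rw [pvFooterLoop_eq_first, PySem.List.pyRange_neg_one_eq_reverse,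
      PySem.List.enumerate_eq_map_pyRange lines "", List.foldl_map,
      pvFoldl_eq_first_reverse
        (fun i => pvHasMarker GUTENBERG_END_MARKERS (PySem.List.pyGetD lines i ""))]
  have h0 : (-1 : Int) + 1 = 0 := by norm_num
  have h1 : (lines.length : Int) - 1 + 1 = PySem.List.len lines := by
    simp [PySem.List.len]
  rw [h0, h1]
  cases pvFirst (fun i => pvHasMarker GUTENBERG_END_MARKERS (PySem.List.pyGetD lines i ""))
      ((PySem.List.pyRange 0 (PySem.List.len lines) 1).reverse) <;> rfl

theorem detect_gutenberg_py_spec : Claim_equal_detect_gutenberg_py := by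
  intro lines _
  show detect_gutenberg_py lines = detect_gutenberg_py_alt lines
  simp only [detect_gutenberg_py, detect_gutenberg_py_alt, pvHeaderFold, pvFooterEq]
  rw [pvFoldl_pair
    (fun a (p : Int × String) => if pvHasMarker GUTENBERG_START_MARKERS p.2 then some p.1 else a)
    (fun a (p : Int × String) => if pvHasMarker GUTENBERG_END_MARKERS p.2 then some p.1 else a)]
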